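-- pv_equiv track=rewrite | github.com/lyharthur/Sequential-Pattern-Mining | broken.py | make_sequence
-- ===== SOURCE A (Python) =====
-- from collections import defaultdict, namedtuple
--
-- def make_sequence(db):
--     sequence_done = []
--     sequence = []
--     itemset = []
--     items = defaultdict(lambda: 0)
--     transactions_done = []
--     i = 0
--     for id_list in db:
--         try:
--             if db[i][0] == db[i+1][0]:
--                 if db[i][1] == db[i+1][1]: # same set
--                     if not itemset :
--                         itemset.append(db[i][2])
--                         itemset.append(db[i+1][2])
--                     else:
--                         itemset.append(db[i+1][2])
--                 else: # same sequence
--                     if not itemset :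
--                         itemset.append(db[i][2])
--                     sequence.append(itemset)
--                     itemset = []
--             else:
--                 if not itemset :
--                     itemset.append(db[i][2])
--                 sequence.append(itemset)
--                 itemset = []
--                 sequence_done.append(sequence)
--                 sequence = []
--
--         except IndexError:
--             if not itemset :
--                 itemset.append(db[i][2])
--             sequence.append(itemset)
--             itemset = []
--             sequence_done.append(sequence)
--             sequence = []
--         i += 1
--
--     return sequence_done
-- ===== SOURCE B (Python) =====
-- def _runs(key, xs):
--     """Split xs into maximal runs of adjacent elements with equal key."""
--     runs = []
--     cur = []
--     for x in xs:
--         if cur and key(cur[0]) == key(x):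
--             cur.append(x)
--         else:
--             if cur:
--                 runs.append(cur)
--             cur = [x]
--     if cur:
--         runs.append(cur)
--     return runs
--
--
-- def make_sequence(db):
--     return [[[e[2] for e in itemset] for itemset in _runs(lambda e: e[1], seq)]
--             for seq in _runs(lambda e: e[0], db)]
-- ===== Notes on version B (the rewrite author's own statement) =====
-- stated objective: simpler
-- what changed: A's single loop with manual index lookahead (db[i] vs db[i+1]) and an IndexError-catching try/except is replaced by two-level adjacent-run grouping: a _runs helper splits the list into maximal runs of equal sequence id, then each run is split into runs of equal itemset id, mapping out the third components.
import Mathlib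
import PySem

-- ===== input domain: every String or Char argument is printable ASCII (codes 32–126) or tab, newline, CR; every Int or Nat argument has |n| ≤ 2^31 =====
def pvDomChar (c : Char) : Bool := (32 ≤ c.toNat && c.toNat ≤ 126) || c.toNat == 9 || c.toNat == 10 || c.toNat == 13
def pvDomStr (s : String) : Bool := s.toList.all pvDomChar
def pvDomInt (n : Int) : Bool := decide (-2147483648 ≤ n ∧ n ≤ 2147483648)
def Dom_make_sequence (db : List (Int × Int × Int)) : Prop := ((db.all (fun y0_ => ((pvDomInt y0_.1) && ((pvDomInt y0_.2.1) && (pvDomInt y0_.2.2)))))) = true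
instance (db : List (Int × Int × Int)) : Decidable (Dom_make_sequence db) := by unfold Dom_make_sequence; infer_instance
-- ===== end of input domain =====

-- B replaces A's index-lookahead loop with try/except by nested adjacent-run grouping
-- (group by sequence id, then by itemset id within each group); objective: simpler, same single-pass cost.


-- ===== PORT A =====
-- loop body of A: state ((sequence_done, sequence, itemset), i); the loop variable is unused, as in the Python
def pvStepA (db : List (Int × Int × Int))
    (st : (List (List (List Int)) × List (List Int) × List Int) × Int)
    (_idList : Int × Int × Int) :
    (List (List (List Int)) × List (List Int) × List Int) × Int :=
  let ((done, seq, its), i) := st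
  match PySem.List.pyGet? db i with
  | none => ((done, seq, its), i + 1)   -- unreachable: i is a valid index throughout the loop
  | some cur =>
    match PySem.List.pyGet? db (i + 1) with
    | some nxt =>
      if cur.1 = nxt.1 then
        if cur.2.1 = nxt.2.1 then      -- same set
          if its = [] then ((done, seq, [cur.2.2, nxt.2.2]), i + 1)
          else ((done, seq, its ++ [nxt.2.2]), i + 1)
        else                            -- same sequence
          ((done, seq ++ [if its = [] then [cur.2.2] else its], []), i + 1)
      else
        ((done ++ [seq ++ [if its = [] then [cur.2.2] else its]], [], []), i + 1)
    | none =>                           -- IndexError raised by db[i+1]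
      ((done ++ [seq ++ [if its = [] then [cur.2.2] else its]], [], []), i + 1)

def make_sequence (db : List (Int × Int × Int)) : List (List (List Int)) :=
  ((db.foldl (pvStepA db) (([], [], []), 0)).1).1

-- ===== PORT B =====
-- _runs from Source B: one pass; the current run 'cur' grows while the key of its first element matches
def pvRunsStep (key : (Int × Int × Int) → Int)
    (st : List (List (Int × Int × Int)) × List (Int × Int × Int))
    (x : Int × Int × Int) :
    List (List (Int × Int × Int)) × List (Int × Int × Int) :=
  let (runs, cur) := st
  if cur ≠ [] ∧ key (cur.headD x) = key x then (runs, cur ++ [x])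
  else ((if cur ≠ [] then runs ++ [cur] else runs), [x])

def pvRuns (key : (Int × Int × Int) → Int) (xs : List (Int × Int × Int)) :
    List (List (Int × Int × Int)) :=
  let st := xs.foldl (pvRunsStep key) ([], [])
  if st.2 ≠ [] then st.1 ++ [st.2] else st.1

def make_sequence_alt (db : List (Int × Int × Int)) : List (List (List Int)) :=
  (pvRuns (fun e => e.1) db).map
    (fun seq => (pvRuns (fun e => e.2.1) seq).map (fun itemset => itemset.map (fun e => e.2.2)))

-- ===== PRECONDITION & SPEC =====
def Spec_make_sequence (db : List (Int × Int × Int)) (out : List (List (List Int))) : Prop := out = make_sequence_alt db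
instance (db : List (Int × Int × Int)) (out : List (List (List Int))) : Decidable (Spec_make_sequence db out) := by unfold Spec_make_sequence; infer_instance

-- ===== CLAIM (what is proved, stated in full; the proofs are below) =====
def Claim_equal_make_sequence : Prop := ∀ (db : List (Int × Int × Int)), Dom_make_sequence db → Spec_make_sequence db (make_sequence db)

-- ===== LEMMAS AND PROOFS =====

-- reference run-splitting, by structural recursion (proof device shared by both sides)
def pvCRuns (key : (Int × Int × Int) → Int) : List (Int × Int × Int) → List (List (Int × Int × Int))
  | [] => []
  | a :: l =>
    match pvCRuns key l with
    | [] => [[a]]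
    | c :: cs => if key a = key (c.headD a) then (a :: c) :: cs else [a] :: c :: cs

theorem pvCRuns_cons (key : (Int × Int × Int) → Int) (a : Int × Int × Int) (l : List (Int × Int × Int)) :
    ∃ c cs, pvCRuns key (a :: l) = (a :: c) :: cs := by
  unfold pvCRuns
  rcases h : pvCRuns key l with _ | ⟨c, cs⟩
  · exact ⟨[], [], rfl⟩
  · dsimp only
    split_ifs
    · exact ⟨c, cs, rfl⟩
    · exact ⟨[], c :: cs, rfl⟩

def pvMerge (key : (Int × Int × Int) → Int) (cur : List (Int × Int × Int))
    (cs : List (List (Int × Int × Int))) : List (List (Int × Int × Int)) :=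
  match cs with
  | [] => [cur]
  | c :: cs' =>
    if key (c.headD (0,0,0)) = key (cur.headD (0,0,0)) then (cur ++ c) :: cs' else cur :: c :: cs'

theorem pvMerge_single (key : (Int × Int × Int) → Int) (x : Int × Int × Int)
    (xs : List (Int × Int × Int)) : pvMerge key [x] (pvCRuns key xs) = pvCRuns key (x :: xs) := by
  rcases xs with _ | ⟨y, ys⟩
  · simp [pvMerge, pvCRuns]
  · obtain ⟨c, cs, hc⟩ := pvCRuns_cons key y ys
    conv_rhs => rw [pvCRuns]
    rw [hc]
    dsimp only [pvMerge, List.headD]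
    by_cases h : key x = key y
    · simp [h]
    · simp [h, Ne.symm h]

theorem pvRuns_fold (key : (Int × Int × Int) → Int) :
    ∀ (xs : List (Int × Int × Int)) (runs : List (List (Int × Int × Int)))
      (h : Int × Int × Int) (m : List (Int × Int × Int)),
      (let st := xs.foldl (pvRunsStep key) (runs, h :: m);
        if st.2 ≠ [] then st.1 ++ [st.2] else st.1)
        = runs ++ pvMerge key (h :: m) (pvCRuns key xs) := by
  intro xs
  induction xs with
  | nil => intro runs h m; simp [pvMerge, pvCRuns]
  | cons x xs' ih =>
    intro runs h m
    simp only [List.foldl_cons]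
    by_cases hk : key h = key x
    · have hstep : pvRunsStep key (runs, h :: m) x = (runs, h :: (m ++ [x])) := by
        simp [pvRunsStep, hk]
      rw [hstep, ih runs h (m ++ [x])]
      congr 1
      rcases xs' with _ | ⟨y, ys⟩
      · simp [pvMerge, pvCRuns, hk.symm]
      · obtain ⟨c, cs, hc⟩ := pvCRuns_cons key y ys
        rw [hc]
        conv_rhs => rw [pvCRuns]
        rw [hc]
        dsimp only
        by_cases hxy : key x = key y
        · rw [if_pos (by simp [hxy])]
          simp [pvMerge, hk.symm, (hk.trans hxy).symm]
        · rw [if_neg (by simp [hxy])]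
          have hyh : ¬ key y = key h := fun he => hxy ((he.trans hk).symm)
          simp [pvMerge, hk.symm, hyh]
    · have hstep : pvRunsStep key (runs, h :: m) x = (runs ++ [h :: m], [x]) := by
        simp [pvRunsStep, hk]
      rw [hstep, ih (runs ++ [h :: m]) x [], pvMerge_single]
      obtain ⟨c, cs, hc⟩ := pvCRuns_cons key x xs'
      rw [hc]
      have hxh : ¬ key x = key h := fun he => hk he.symm
      simp [pvMerge, hxh]

theorem pvRuns_eq_cRuns (key : (Int × Int × Int) → Int) (xs : List (Int × Int × Int)) :
    pvRuns key xs = pvCRuns key xs := by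
  rcases xs with _ | ⟨x, xs'⟩
  · simp [pvRuns, pvCRuns]
  · have h0 : pvRunsStep key ([], []) x = ([], [x]) := by simp [pvRunsStep]
    simp only [pvRuns, List.foldl_cons, h0]
    calc _ = ([] : List (List (Int × Int × Int))) ++ pvMerge key [x] (pvCRuns key xs') :=
          pvRuns_fold key xs' [] x []
      _ = pvCRuns key (x :: xs') := by rw [List.nil_append, pvMerge_single]

-- A's loop, restated as pair-lookahead recursion
def pvStepSome (st : List (List (List Int)) × List (List Int) × List Int)
    (a b : Int × Int × Int) : List (List (List Int)) × List (List Int) × List Int :=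
  let (done, seq, its) := st
  if a.1 = b.1 then
    if a.2.1 = b.2.1 then
      if its = [] then (done, seq, [a.2.2, b.2.2]) else (done, seq, its ++ [b.2.2])
    else (done, seq ++ [if its = [] then [a.2.2] else its], [])
  else (done ++ [seq ++ [if its = [] then [a.2.2] else its]], [], [])

def pvStepNone (st : List (List (List Int)) × List (List Int) × List Int)
    (a : Int × Int × Int) : List (List (List Int)) × List (List Int) × List Int :=
  (st.1 ++ [st.2.1 ++ [if st.2.2 = [] then [a.2.2] else st.2.2]], [], [])

def pvPairRec (st : List (List (List Int)) × List (List Int) × List Int) :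
    List (Int × Int × Int) → List (List (List Int)) × List (List Int) × List Int
  | [] => st
  | [a] => pvStepNone st a
  | a :: b :: t => pvPairRec (pvStepSome st a b) (b :: t)

theorem pvFoldA_eq_pairRec :
    ∀ (suf pre : List (Int × Int × Int)) (st : List (List (List Int)) × List (List Int) × List Int),
      suf.foldl (pvStepA (pre ++ suf)) (st, (pre.length : Int))
        = (pvPairRec st suf, (pre.length : Int) + (suf.length : Int)) := by
  intro suf
  induction suf with
  | nil => intro pre st; simp [pvPairRec]
  | cons a suf' ih =>
    intro pre st
    simp only [List.foldl_cons]
    have hcur : PySem.List.pyGet? (pre ++ a :: suf') (pre.length : Int) = some a :=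
      PySem.List.pyGet?_append_length pre suf' a
    have hnxt : PySem.List.pyGet? (pre ++ a :: suf') ((pre.length : Int) + 1) = suf'[0]? := by
      have h1 := PySem.List.pyGet?_append_right (pre := pre) (ys := a :: suf') (k := 1)
      simpa using h1
    rcases suf' with _ | ⟨b, t⟩
    · have hstep : pvStepA (pre ++ [a]) (st, (pre.length : Int)) a
          = (pvStepNone st a, (pre.length : Int) + 1) := by
        obtain ⟨done, seq, its⟩ := st
        simp only [List.getElem?_nil] at hnxt
        simp [pvStepA, pvStepNone, hnxt]
      rw [hstep]
      simp [pvPairRec]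
    · have hstep : pvStepA (pre ++ a :: b :: t) (st, (pre.length : Int)) a
          = (pvStepSome st a b, (pre.length : Int) + 1) := by
        obtain ⟨done, seq, its⟩ := st
        simp only [List.getElem?_cons_zero] at hnxt
        simp only [pvStepA, pvStepSome, hcur, hnxt]
        split_ifs <;> rfl
      rw [hstep]
      have hdb : pre ++ a :: b :: t = (pre ++ [a]) ++ (b :: t) := by simp
      have hi : (pre.length : Int) + 1 = (((pre ++ [a]).length : Nat) : Int) := by simp
      rw [hdb, hi, ih (pre ++ [a]) (pvStepSome st a b), Prod.mk.injEq]
      constructor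
      · conv_rhs => rw [pvPairRec]
      · simp; ring

def pvV (e : Int × Int × Int) : Int := e.2.2
def pvEff (its : List Int) (a : Int × Int × Int) : List Int := if its = [] then [a.2.2] else its
def pvInner (g : List (Int × Int × Int)) : List (List Int) :=
  (pvCRuns (fun e => e.2.1) g).map (List.map pvV)
def pvInnerEff (its : List Int) (g : List (Int × Int × Int)) : List (List Int) :=
  match pvCRuns (fun e => e.2.1) g with
  | [] => []
  | c :: cs => (pvEff its (c.headD (0,0,0)) ++ (c.drop 1).map pvV) :: cs.map (List.map pvV)
def pvResult (seq : List (List Int)) (its : List Int) (l : List (Int × Int × Int)) :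
    List (List (List Int)) :=
  match pvCRuns (fun e => e.1) l with
  | [] => []
  | g :: gs => (seq ++ pvInnerEff its g) :: gs.map pvInner

theorem pvInnerEff_nil (a : Int × Int × Int) (g : List (Int × Int × Int)) :
    pvInnerEff [] (a :: g) = pvInner (a :: g) := by
  obtain ⟨c, cs, hc⟩ := pvCRuns_cons (fun e => e.2.1) a g
  simp [pvInnerEff, pvInner, hc, pvEff, pvV]

theorem pvPairRec_result :
    ∀ (l : List (Int × Int × Int)) (a : Int × Int × Int)
      (done : List (List (List Int))) (seq : List (List Int)) (its : List Int),
      (pvPairRec (done, seq, its) (a :: l)).1 = done ++ pvResult seq its (a :: l) := by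
  intro l
  induction l with
  | nil =>
    intro a done seq its
    simp [pvPairRec, pvStepNone, pvResult, pvInnerEff, pvCRuns, pvEff]
  | cons b t ih =>
    intro a done seq its
    obtain ⟨g', gs, hg⟩ := pvCRuns_cons (fun e => e.1) b t
    obtain ⟨c', cs', hc⟩ := pvCRuns_cons (fun e => e.2.1) b g'
    rw [show pvPairRec (done, seq, its) (a :: b :: t)
        = pvPairRec (pvStepSome (done, seq, its) a b) (b :: t) from rfl]
    by_cases h1 : a.1 = b.1
    · by_cases h2 : a.2.1 = b.2.1
      · -- same sequence, same itemset
        have hk1 : pvCRuns (fun e => e.1) (a :: b :: t) = (a :: b :: g') :: gs := by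
          conv_lhs => rw [pvCRuns]
          rw [hg]; simp [h1]
        have hk2 : pvCRuns (fun e => e.2.1) (a :: b :: g') = (a :: b :: c') :: cs' := by
          conv_lhs => rw [pvCRuns]
          rw [hc]; simp [h2]
        have hsome : pvStepSome (done, seq, its) a b = (done, seq, pvEff its a ++ [b.2.2]) := by
          rcases its <;> simp [pvStepSome, h1, h2, pvEff]
        rw [hsome, ih b done seq _]
        congr 1
        simp only [pvResult, hk1, hg, pvInnerEff, hk2, hc]
        simp [pvEff, pvV]
      · -- same sequence, new itemset
        have hk1 : pvCRuns (fun e => e.1) (a :: b :: t) = (a :: b :: g') :: gs := by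
          conv_lhs => rw [pvCRuns]
          rw [hg]; simp [h1]
        have hk2 : pvCRuns (fun e => e.2.1) (a :: b :: g') = [a] :: (b :: c') :: cs' := by
          conv_lhs => rw [pvCRuns]
          rw [hc]; simp [h2]
        have hsome : pvStepSome (done, seq, its) a b = (done, seq ++ [pvEff its a], []) := by
          simp [pvStepSome, h1, h2, pvEff]
        rw [hsome, ih b done (seq ++ [pvEff its a]) []]
        congr 1
        simp only [pvResult, hk1, hg, pvInnerEff, hk2, hc]
        simp [pvEff, pvV]
    · -- new sequence
      have hk1 : pvCRuns (fun e => e.1) (a :: b :: t) = [a] :: (b :: g') :: gs := by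
        conv_lhs => rw [pvCRuns]
        rw [hg]; simp [h1]
      have hsome : pvStepSome (done, seq, its) a b
          = (done ++ [seq ++ [pvEff its a]], [], []) := by
        simp [pvStepSome, h1, pvEff]
      rw [hsome, ih b (done ++ [seq ++ [pvEff its a]]) [] []]
      have hia : pvInnerEff its [a] = [pvEff its a] := by
        simp [pvInnerEff, pvCRuns, pvEff]
      simp only [pvResult, hk1, hg, hia, pvInnerEff_nil, List.nil_append]
      simp [pvEff]

-- ===== VERDICT (by name: the statement is the Claim_ definition above) =====
theorem make_sequence_spec : Claim_equal_make_sequence := by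
  intro db _hdom
  simp only [Spec_make_sequence]
  have hB : make_sequence_alt db = (pvCRuns (fun e => e.1) db).map pvInner := by
    simp only [make_sequence_alt, pvRuns_eq_cRuns]
    exact List.map_congr_left (fun g _ => by simp [pvInner, pvV])
  have hA : make_sequence db = (pvCRuns (fun e => e.1) db).map pvInner := by
    have h0 := pvFoldA_eq_pairRec db [] ([], [], [])
    simp only [List.nil_append, List.length_nil, Nat.cast_zero] at h0
    rcases db with _ | ⟨a, l⟩
    · simp [make_sequence, pvCRuns]
    · obtain ⟨g', gs, hg⟩ := pvCRuns_cons (fun e => e.1) a l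
      simp only [make_sequence, h0, pvPairRec_result, pvResult, hg, pvInnerEff_nil,
        List.nil_append]
      simp
  rw [hA, hB]
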